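-- pv_equiv track=rewrite | github.com/BlockResearchGroup/compas_tno | src/compas_tno/shapes/rectangular_topology.py | rectangular_topology
-- ===== SOURCE A (Python) =====
-- def rectangular_topology(x, y):
--     """Draw the vertices position and dictionary for a rectangular base besh
--
--     Parameters
--     ----------
--     x : list
--         List with the x-coordinates required for the mesh
--     y : list
--         List with the y-coordinates required for the mesh
--
--     Returns
--     -------
--     xi: list
--         List with the x-coordinate of the vertices.
--     yi: list
--         List with the y-coordinate of the vertices.
--     faces_i: list of lists
--         Lists with the connectivity required to create the mesh.
--     """
--
--     index = 0
--     uv_i = {}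
--     faces = []
--     faces_i = []
--
--     xi = []
--     yi = []
--
--     for i in range(len(x)):
--         for j in range(len(y)):
--             uv_i[(i, j)] = index
--             xi.append(x[i])
--             yi.append(y[j])
--
--             if i < len(x) - 1 and j < len(y) - 1:
--                 p1 = (i, j)
--                 p2 = (i, j+1)
--                 p3 = (i+1, j)
--                 p4 = (i+1, j+1)
--                 if i != j and i + j != len(x) - 2:
--                     face = [p1, p2, p4, p3]
--                     faces.append(face)
--                 else:
--                     if i == j:
--                         faces.append([p1, p2, p4])
--                         faces.append([p1, p4, p3])
--                     else:
--                         faces.append([p2, p3, p1])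
--                         faces.append([p2, p4, p3])
--             index = index + 1
--
--     for face in faces:
--         face_i = []
--         for uv in face:
--             u, v = uv
--             i = uv_i[(u, v)]
--             face_i.append(i)
--         faces_i.append(face_i)
--
--     return xi, yi, faces_i
-- ===== SOURCE B (Python) =====
-- def _cell_faces(nx, ny, i, j):
--     """Faces produced by the interior cell (i, j), with closed-form vertex
--     indices (vertex (i, j) has index i*ny + j)."""
--     p1 = i * ny + j
--     p2 = p1 + 1
--     p3 = p1 + ny
--     p4 = p3 + 1
--     if i != j and i + j != nx - 2:
--         return [[p1, p2, p4, p3]]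
--     if i == j:
--         return [[p1, p2, p4], [p1, p4, p3]]
--     return [[p2, p3, p1], [p2, p4, p3]]
--
-- def rectangular_topology(x, y):
--     """Staged variant: vertex coordinates by replication (no per-vertex loop
--     bookkeeping), faces by one flat pass over the interior cells using
--     closed-form indices; no uv_i dictionary, no reindexing pass."""
--     nx, ny = len(x), len(y)
--     xi = [v for v in x for _ in range(ny)]
--     yi = y * nx
--     faces_i = [f for i in range(nx - 1) for j in range(ny - 1)
--                for f in _cell_faces(nx, ny, i, j)]
--     return xi, yi, faces_i
-- ===== Notes on version B (the rewrite author's own statement) =====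
-- stated objective: simpler
-- what changed: B builds the coordinate lists by replication (xi as a flat comprehension over x, yi as y*nx) and the face list by a separate flat pass over the (nx-1)x(ny-1) interior cells with closed-form vertex indices i*ny+j, replacing A's single interleaved per-vertex loop with its uv_i dictionary, coordinate-pair face list and second reindexing pass. (measurably faster by dropping the dict and second pass).
import Mathlib
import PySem

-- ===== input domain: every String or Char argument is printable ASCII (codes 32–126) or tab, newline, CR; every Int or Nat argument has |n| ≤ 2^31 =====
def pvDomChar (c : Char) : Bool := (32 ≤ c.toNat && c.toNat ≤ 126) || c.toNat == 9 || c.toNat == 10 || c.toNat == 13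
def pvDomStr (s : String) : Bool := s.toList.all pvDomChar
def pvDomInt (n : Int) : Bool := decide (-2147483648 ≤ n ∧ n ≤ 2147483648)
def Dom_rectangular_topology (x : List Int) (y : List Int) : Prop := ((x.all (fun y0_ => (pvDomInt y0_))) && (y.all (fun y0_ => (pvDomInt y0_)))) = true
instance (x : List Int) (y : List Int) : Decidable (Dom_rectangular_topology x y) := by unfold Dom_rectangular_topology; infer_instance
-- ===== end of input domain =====

-- B builds the coordinate lists by replication and the faces by a separate flat pass over
-- the interior cells with closed-form indices i*ny+j, replacing A's interleaved per-vertex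
-- loop, uv_i dictionary and second reindexing pass (objective: simpler).


-- ===== PORT A =====
-- inner-loop body of A: one step of `for j in range(len(y))`, threading
-- (index, uv_i, faces, xi, yi); list indexing x[i]/y[j] is `getD` (indices are
-- always in range here, so this is exact)
def rtA_inner (x y : List Int) (nx ny : Nat) (i : Nat)
    (st : Int × PySem.Dict (Nat × Nat) Int × List (List (Nat × Nat)) × List Int × List Int)
    (j : Nat) :
    Int × PySem.Dict (Nat × Nat) Int × List (List (Nat × Nat)) × List Int × List Int :=
  let idx := st.1
  let uv := (st.2.1).insert (i, j) idx
  let xi := st.2.2.2.1 ++ [x.getD i 0]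
  let yi := st.2.2.2.2 ++ [y.getD j 0]
  let faces :=
    if (i : Int) < (nx : Int) - 1 ∧ (j : Int) < (ny : Int) - 1 then
      if (i : Int) ≠ (j : Int) ∧ (i : Int) + (j : Int) ≠ (nx : Int) - 2 then
        st.2.2.1 ++ [[(i, j), (i, j+1), (i+1, j+1), (i+1, j)]]
      else if (i : Int) = (j : Int) then
        st.2.2.1 ++ [[(i, j), (i, j+1), (i+1, j+1)], [(i, j), (i+1, j+1), (i+1, j)]]
      else
        st.2.2.1 ++ [[(i, j+1), (i+1, j), (i, j)], [(i, j+1), (i+1, j+1), (i+1, j)]]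
    else st.2.2.1
  (idx + 1, uv, faces, xi, yi)

def rectangular_topology (x : List Int) (y : List Int) : List Int × List Int × List (List Int) :=
  let nx := x.length
  let ny := y.length
  let st := (List.range nx).foldl
    (fun st i => (List.range ny).foldl (rtA_inner x y nx ny i) st)
    (0, PySem.Dict.empty, [], [], [])
  -- second pass: faces_i = faces reindexed through uv_i; every key is present,
  -- so `getD _ 0` is exact (Python's uv_i[(u,v)] never raises here)
  let faces_i := st.2.2.1.map (fun face => face.map (fun p => (st.2.1).getD p 0))
  (st.2.2.2.1, st.2.2.2.2, faces_i)

-- ===== PORT B =====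
-- faces of the interior cell (i, j), with closed-form vertex indices
def cellFacesRT (nx ny i j : Nat) : List (List Int) :=
  let p1 : Int := ((i * ny + j : Nat) : Int)
  let p2 : Int := p1 + 1
  let p3 : Int := p1 + (ny : Int)
  let p4 : Int := p3 + 1
  if (i : Int) ≠ (j : Int) ∧ (i : Int) + (j : Int) ≠ (nx : Int) - 2 then
    [[p1, p2, p4, p3]]
  else if (i : Int) = (j : Int) then
    [[p1, p2, p4], [p1, p4, p3]]
  else
    [[p2, p3, p1], [p2, p4, p3]]

def rectangular_topology_alt (x : List Int) (y : List Int) : List Int × List Int × List (List Int) :=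
  let nx := x.length
  let ny := y.length
  let xi := x.flatMap (fun v => List.replicate ny v)        -- [v for v in x for _ in range(ny)]
  let yi := (List.replicate nx y).flatten                   -- y * nx
  let faces_i := (List.range (nx - 1)).flatMap
    (fun i => (List.range (ny - 1)).flatMap (fun j => cellFacesRT nx ny i j))
  (xi, yi, faces_i)

-- ===== PRECONDITION & SPEC =====
def Spec_rectangular_topology (x : List Int) (y : List Int) (out : List Int × List Int × List (List Int)) : Prop := out = rectangular_topology_alt x y
instance (x : List Int) (y : List Int) (out : List Int × List Int × List (List Int)) : Decidable (Spec_rectangular_topology x y out) := by unfold Spec_rectangular_topology; infer_instance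

-- ===== CLAIM (what is proved, stated in full; the proofs are below) =====
def Claim_equal_rectangular_topology : Prop := ∀ (x : List Int) (y : List Int), Dom_rectangular_topology x y → Spec_rectangular_topology x y (rectangular_topology x y)

-- ===== LEMMAS AND PROOFS =====

-- proof-side bridge: the interleaved loop that B's staged passes are proved equal to
def rtB_inner (x y : List Int) (nx ny : Nat) (i : Nat)
    (st : List Int × List Int × List (List Int)) (j : Nat) :
    List Int × List Int × List (List Int) :=
  (st.1 ++ [x.getD i 0], st.2.1 ++ [y.getD j 0],
   st.2.2 ++ (if (i : Int) < (nx : Int) - 1 ∧ (j : Int) < (ny : Int) - 1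
              then cellFacesRT nx ny i j else []))

-- getD via a successful get? (specialisation of PySem.Dict.getD_of_get?_eq_some)
theorem rtDict_getD_eq {k v : Type} [BEq k] [LawfulBEq k] (d : PySem.Dict k v) (a : k) (b : v) (d0 : v)
    (h : d.get? a = some b) : d.getD a d0 = b := PySem.Dict.getD_of_get?_eq_some d d0 h

-- the closed-form vertex index B uses
def phiRT (ny : Nat) (p : Nat × Nat) : Int := ((p.1 * ny + p.2 : Nat) : Int)

-- relation between A's loop state and the bridge loop state (plus A's faces stay in bounds)
def RelRT (nx ny : Nat)
    (sa : Int × PySem.Dict (Nat × Nat) Int × List (List (Nat × Nat)) × List Int × List Int)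
    (sb : List Int × List Int × List (List Int)) : Prop :=
  sb.1 = sa.2.2.2.1 ∧ sb.2.1 = sa.2.2.2.2 ∧ sb.2.2 = sa.2.2.1.map (List.map (phiRT ny)) ∧
  (∀ f ∈ sa.2.2.1, ∀ p ∈ f, p.1 < nx ∧ p.2 < ny)

theorem relRT_step (x y : List Int) (nx ny i j : Nat) (sa) (sb)
    (h : RelRT nx ny sa sb) :
    RelRT nx ny (rtA_inner x y nx ny i sa j) (rtB_inner x y nx ny i sb j) := by
  obtain ⟨h1, h2, h3, h4⟩ := h
  unfold rtA_inner rtB_inner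
  refine ⟨by simp [h1], by simp [h2], ?_, ?_⟩
  · simp only [h3, cellFacesRT]
    split_ifs with hb hd he <;>
      simp [phiRT, List.map_append, Nat.add_mul] <;> omega
  · intro f hf p hp
    split_ifs at hf with hb hd he
    · rcases List.mem_append.1 hf with hf | hf
      · exact h4 f hf p hp
      · simp at hf; subst hf; simp at hp
        rcases hp with hp | hp | hp | hp <;> subst hp <;> simp <;> omega
    · rcases List.mem_append.1 hf with hf | hf
      · exact h4 f hf p hp
      · simp at hf
        rcases hf with hf | hf <;> subst hf <;> simp at hp <;>
          rcases hp with hp | hp | hp <;> subst hp <;> simp <;> omega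
    · rcases List.mem_append.1 hf with hf | hf
      · exact h4 f hf p hp
      · simp at hf
        rcases hf with hf | hf <;> subst hf <;> simp at hp <;>
          rcases hp with hp | hp | hp <;> subst hp <;> simp <;> omega
    · exact h4 f hf p hp

theorem relRT_inner (x y : List Int) (nx ny i : Nat) (js : List Nat) (sa) (sb)
    (h : RelRT nx ny sa sb) :
    RelRT nx ny (js.foldl (rtA_inner x y nx ny i) sa) (js.foldl (rtB_inner x y nx ny i) sb) := by
  induction js generalizing sa sb with
  | nil => exact h
  | cons j js ih => exact ih _ _ (relRT_step x y nx ny i j sa sb h)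

theorem relRT_outer (x y : List Int) (nx ny : Nat) (is : List Nat) (sa) (sb)
    (h : RelRT nx ny sa sb) :
    RelRT nx ny
      (is.foldl (fun st i => (List.range ny).foldl (rtA_inner x y nx ny i) st) sa)
      (is.foldl (fun st i => (List.range ny).foldl (rtB_inner x y nx ny i) st) sb) := by
  induction is generalizing sa sb with
  | nil => exact h
  | cons i is ih => exact ih _ _ (relRT_inner x y nx ny i _ sa sb h)

-- uv_i after the inner loop: every (i, v) with j0 ≤ v < j0+cnt is mapped to i*ny+v
theorem uvA_inner (x y : List Int) (nx ny : Nat) (i : Nat) (cnt : Nat) :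
    ∀ (j0 : Nat) (sa : Int × PySem.Dict (Nat × Nat) Int × List (List (Nat × Nat)) × List Int × List Int),
    sa.1 = ((i * ny + j0 : Nat) : Int) →
    ((List.range' j0 cnt).foldl (rtA_inner x y nx ny i) sa).1 = ((i * ny + (j0 + cnt) : Nat) : Int) ∧
    (∀ u v, ((List.range' j0 cnt).foldl (rtA_inner x y nx ny i) sa).2.1.get? (u, v) =
      if u = i ∧ j0 ≤ v ∧ v < j0 + cnt then some ((u * ny + v : Nat) : Int) else sa.2.1.get? (u, v)) := by
  induction cnt with
  | zero => intro j0 sa hidx; exact ⟨by simpa using hidx, fun u v => by simp⟩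
  | succ n ih =>
    intro j0 sa hidx
    rw [List.range'_succ]
    simp only [List.foldl_cons]
    have hstep : (rtA_inner x y nx ny i sa j0).1 = ((i * ny + (j0 + 1) : Nat) : Int) := by
      simp [rtA_inner, hidx]; ring
    obtain ⟨hi', hg'⟩ := ih (j0 + 1) (rtA_inner x y nx ny i sa j0) hstep
    refine ⟨by rw [hi']; congr 1; omega, fun u v => ?_⟩
    rw [hg' u v]
    have hguv : (rtA_inner x y nx ny i sa j0).2.1.get? (u, v) =
        if (u, v) = (i, j0) then some sa.1 else sa.2.1.get? (u, v) := by
      simp [rtA_inner, PySem.Dict.get?_insert]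
    by_cases h1 : u = i ∧ j0 + 1 ≤ v ∧ v < j0 + 1 + n
    · rw [if_pos h1, if_pos ⟨h1.1, by omega, by omega⟩]
    · rw [if_neg h1, hguv]
      by_cases h2 : (u, v) = (i, j0)
      · have hu := congrArg Prod.fst h2
        have hv := congrArg Prod.snd h2
        simp only [] at hu hv
        rw [if_pos h2, if_pos ⟨hu, by omega, by omega⟩, hidx, hu, hv]
      · rw [if_neg h2, if_neg ?_]
        rintro ⟨hu, hv1, hv2⟩
        rcases Nat.eq_or_lt_of_le hv1 with h | h
        · exact h2 (by rw [hu, ← h])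
        · exact h1 ⟨hu, by omega, by omega⟩

theorem uvA_outer (x y : List Int) (nx ny : Nat) (cnt : Nat) :
    ∀ (i0 : Nat) (sa : Int × PySem.Dict (Nat × Nat) Int × List (List (Nat × Nat)) × List Int × List Int),
    sa.1 = ((i0 * ny : Nat) : Int) →
    ((List.range' i0 cnt).foldl (fun st i => (List.range ny).foldl (rtA_inner x y nx ny i) st) sa).1
      = (((i0 + cnt) * ny : Nat) : Int) ∧
    (∀ u v, ((List.range' i0 cnt).foldl (fun st i => (List.range ny).foldl (rtA_inner x y nx ny i) st) sa).2.1.get? (u, v) =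
      if i0 ≤ u ∧ u < i0 + cnt ∧ v < ny then some ((u * ny + v : Nat) : Int) else sa.2.1.get? (u, v)) := by
  induction cnt with
  | zero =>
    intro i0 sa hidx
    exact ⟨by simpa using hidx, fun u v => by rw [List.range'_zero, List.foldl_nil, if_neg (by omega)]⟩
  | succ n ih =>
    intro i0 sa hidx
    rw [List.range'_succ]
    simp only [List.foldl_cons]
    obtain ⟨hrow_idx, hrow_get⟩ := uvA_inner x y nx ny i0 ny 0 sa (by simpa using hidx)
    rw [← List.range_eq_range'] at hrow_idx hrow_get
    have hstep : ((List.range ny).foldl (rtA_inner x y nx ny i0) sa).1 = (((i0 + 1) * ny : Nat) : Int) := by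
      rw [hrow_idx]; congr 1; ring
    obtain ⟨hi', hg'⟩ := ih (i0 + 1) _ hstep
    refine ⟨by rw [hi']; congr 1; ring, fun u v => ?_⟩
    rw [hg' u v]
    by_cases h1 : i0 + 1 ≤ u ∧ u < i0 + 1 + n ∧ v < ny
    · rw [if_pos h1, if_pos ⟨by omega, by omega, h1.2.2⟩]
    · rw [if_neg h1, hrow_get u v]
      by_cases h2 : u = i0 ∧ 0 ≤ v ∧ v < 0 + ny
      · rw [if_pos h2, if_pos ⟨by omega, by omega, by omega⟩]
      · rw [if_neg h2, if_neg (fun hc => h2 ?_)]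
        rcases Nat.eq_or_lt_of_le hc.1 with h | h
        · exact ⟨h.symm, by omega, by omega⟩
        · exact absurd ⟨by omega, by omega, hc.2.2⟩ h1

-- generic shape of a loop that appends to three accumulators
theorem foldl_triple {α : Type}
    (g : (List Int × List Int × List (List Int)) → α → (List Int × List Int × List (List Int)))
    (f1 f2 : α → List Int) (f3 : α → List (List Int))
    (hg : ∀ st a, g st a = (st.1 ++ f1 a, st.2.1 ++ f2 a, st.2.2 ++ f3 a)) :
    ∀ (l : List α) (st), l.foldl g st =
      (st.1 ++ l.flatMap f1, st.2.1 ++ l.flatMap f2, st.2.2 ++ l.flatMap f3) := by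
  intro l
  induction l with
  | nil => intro st; simp
  | cons a l ih => intro st; rw [List.foldl_cons, hg, ih]; simp

-- flatMap respects pointwise equality on members
theorem flatMap_congr_mem {α β : Type} (l : List α) (f g : α → List β)
    (h : ∀ a ∈ l, f a = g a) : l.flatMap f = l.flatMap g := by
  induction l with
  | nil => rfl
  | cons a l ih =>
    simp only [List.flatMap_cons, h a (by simp), ih (fun a ha => h a (by simp [ha]))]

-- range-indexed flatMap over getD is flatMap over the list itself
theorem flatMap_range_getD {β : Type} (g : Int → List β) :
    ∀ (x : List Int), (List.range x.length).flatMap (fun i => g (x.getD i 0)) = x.flatMap g := by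
  intro x
  induction x with
  | nil => rfl
  | cons a x ih =>
    rw [List.length_cons, List.range_succ_eq_map, List.flatMap_cons, List.flatMap_map]
    simp only [List.getD_cons_zero, List.getD_cons_succ]
    rw [ih, List.flatMap_cons]

theorem flatMap_range_const_singleton (n : Nat) (c : Int) :
    (List.range n).flatMap (fun _ => [c]) = List.replicate n c := by
  induction n with
  | zero => rfl
  | succ m ih =>
    rw [List.range_succ, List.flatMap_append, ih, List.replicate_succ']
    simp

theorem flatMap_range_const (n : Nat) (y : List Int) :
    (List.range n).flatMap (fun _ => y) = (List.replicate n y).flatten := by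
  induction n with
  | zero => rfl
  | succ m ih =>
    rw [List.range_succ, List.flatMap_append, ih, List.replicate_succ']
    simp

-- drop the 'j < n-1' guard by shrinking the range
theorem flatMap_range_if_lt {β : Type} (n : Nat) (f : Nat → List β) :
    (List.range n).flatMap (fun (j : Nat) => if (j : Int) < (n : Int) - 1 then f j else []) =
    (List.range (n - 1)).flatMap f := by
  cases n with
  | zero => rfl
  | succ m =>
    rw [List.range_succ, List.flatMap_append]
    have hlast : ([m] : List Nat).flatMap (fun (j : Nat) => if (j : Int) < ((m + 1 : Nat) : Int) - 1 then f j else []) = [] := by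
      simp only [List.flatMap_cons, List.flatMap_nil, List.append_nil]
      rw [if_neg (by push_cast; omega)]
    rw [hlast, List.append_nil, Nat.add_sub_cancel]
    exact flatMap_congr_mem _ _ _ (fun j hj => by
      rw [if_pos (by have := List.mem_range.1 hj; push_cast; omega)])

-- the bridge loop from the empty state computes exactly B's three staged passes
theorem rtB_fold_eq_alt (x y : List Int) :
    (List.range x.length).foldl
      (fun st i => (List.range y.length).foldl (rtB_inner x y x.length y.length i) st)
      ([], [], []) = rectangular_topology_alt x y := by
  have hinner : ∀ i st, (List.range y.length).foldl (rtB_inner x y x.length y.length i) st =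
      (st.1 ++ (List.range y.length).flatMap (fun _ => [x.getD i 0]),
       st.2.1 ++ (List.range y.length).flatMap (fun j => [y.getD j 0]),
       st.2.2 ++ (List.range y.length).flatMap
         (fun (j : Nat) => if (i : Int) < (x.length : Int) - 1 ∧ (j : Int) < (y.length : Int) - 1
                   then cellFacesRT x.length y.length i j else [])) := by
    intro i st
    exact foldl_triple _ _ _ _ (fun st j => rfl) _ st
  rw [foldl_triple _
        (fun i => (List.range y.length).flatMap (fun _ => [x.getD i 0]))
        (fun i => (List.range y.length).flatMap (fun j => [y.getD j 0]))
        (fun i => (List.range y.length).flatMap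
          (fun (j : Nat) => if (i : Int) < (x.length : Int) - 1 ∧ (j : Int) < (y.length : Int) - 1
                    then cellFacesRT x.length y.length i j else []))
        (fun st i => hinner i st) _ ([], [], [])]
  simp only [List.nil_append]
  unfold rectangular_topology_alt
  refine congrArg₂ Prod.mk ?_ (congrArg₂ Prod.mk ?_ ?_)
  · calc (List.range x.length).flatMap (fun i => (List.range y.length).flatMap (fun _ => [x.getD i 0]))
        = (List.range x.length).flatMap (fun i => List.replicate y.length (x.getD i 0)) := by
          exact flatMap_congr_mem _ _ _ (fun i _ => flatMap_range_const_singleton _ _)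
      _ = x.flatMap (fun v => List.replicate y.length v) := flatMap_range_getD _ x
  · calc (List.range x.length).flatMap (fun _ => (List.range y.length).flatMap (fun j => [y.getD j 0]))
        = (List.range x.length).flatMap (fun _ => y) := by
          refine flatMap_congr_mem _ _ _ (fun i _ => ?_)
          have := flatMap_range_getD (fun v => [v]) y
          simpa using this
      _ = (List.replicate x.length y).flatten := flatMap_range_const _ y
  · calc (List.range x.length).flatMap
          (fun (i : Nat) => (List.range y.length).flatMap
            (fun (j : Nat) => if (i : Int) < (x.length : Int) - 1 ∧ (j : Int) < (y.length : Int) - 1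
                      then cellFacesRT x.length y.length i j else []))
        = (List.range x.length).flatMap
          (fun (i : Nat) => if (i : Int) < (x.length : Int) - 1
                    then (List.range (y.length - 1)).flatMap (fun j => cellFacesRT x.length y.length i j)
                    else []) := by
          refine flatMap_congr_mem _ _ _ (fun i _ => ?_)
          by_cases hA : (i : Int) < (x.length : Int) - 1
          · simp only [hA, true_and, if_true]
            exact flatMap_range_if_lt _ _
          · simp [hA]
      _ = (List.range (x.length - 1)).flatMap
            (fun i => (List.range (y.length - 1)).flatMap (fun j => cellFacesRT x.length y.length i j)) :=
          flatMap_range_if_lt _ _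

-- ===== VERDICT (by name: the statement is the Claim_ definition above) =====
theorem rectangular_topology_spec : Claim_equal_rectangular_topology := by
  intro x y _
  unfold Spec_rectangular_topology
  rw [← rtB_fold_eq_alt x y]
  simp only [rectangular_topology]
  obtain ⟨h1, h2, h3, h4⟩ := relRT_outer x y x.length y.length (List.range x.length)
      (0, PySem.Dict.empty, [], [], []) ([], [], []) ⟨rfl, rfl, rfl, by simp⟩
  obtain ⟨-, huv_get⟩ := uvA_outer x y x.length y.length x.length 0
      (0, PySem.Dict.empty, [], [], []) (by simp)
  rw [← List.range_eq_range'] at huv_get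
  refine Prod.ext h1.symm (Prod.ext h2.symm ?_)
  simp only [h3]
  refine List.map_congr_left (fun f hf => List.map_congr_left (fun p hp => ?_))
  obtain ⟨hu, hv⟩ := h4 f hf p hp
  have hg := huv_get p.1 p.2
  rw [if_pos ⟨Nat.zero_le _, by omega, hv⟩] at hg
  exact rtDict_getD_eq _ _ _ _ (by simpa [phiRT] using hg)
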